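-- pv_equiv track=rewrite | github.com/Izumi0527/Intelligent-AI-Network-Diagnostic-Platform | backend/app/core/network/telnet/devices/huawei.py | _clean_huawei_response
-- ===== SOURCE A (Python) =====
-- def _clean_huawei_response(response: str, command: str) -> str:
--     """清理华为设备响应"""
--     if not response:
--         return ""
--
--     # 移除命令回显
--     lines = response.split('\n')
--     cleaned_lines = []
--
--     skip_first_command = True
--     for line in lines:
--         line = line.strip()
--
--         # 跳过命令回显行
--         if skip_first_command and line == command.strip():
--             skip_first_command = False
--             continue
--
--         # 跳过分页提示
--         if "---- More ----" in line:
--             continue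
--
--         # 跳过空行和提示符行
--         if line and not any(line.endswith(prompt) for prompt in [">", "]", "#"]):
--             cleaned_lines.append(line)
--
--     return '\n'.join(cleaned_lines)
-- ===== SOURCE B (Python) =====
-- def _keep(line: str) -> bool:
--     return bool(line) and "---- More ----" not in line and not line.endswith((">", "]", "#"))
--
--
-- def _clean_huawei_response(response: str, command: str) -> str:
--     lines = [line.strip() for line in response.split('\n')]
--     try:
--         lines.remove(command.strip())
--     except ValueError:
--         pass
--     return '\n'.join(filter(_keep, lines))
-- ===== Notes on version B (the rewrite author's own statement) =====
-- stated objective: simpler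
-- what changed: Replaces the carried skip_first_command flag loop with a precomputed first-echo removal (list.remove of the stripped command) followed by one stateless filter over the stripped lines.
import Mathlib
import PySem

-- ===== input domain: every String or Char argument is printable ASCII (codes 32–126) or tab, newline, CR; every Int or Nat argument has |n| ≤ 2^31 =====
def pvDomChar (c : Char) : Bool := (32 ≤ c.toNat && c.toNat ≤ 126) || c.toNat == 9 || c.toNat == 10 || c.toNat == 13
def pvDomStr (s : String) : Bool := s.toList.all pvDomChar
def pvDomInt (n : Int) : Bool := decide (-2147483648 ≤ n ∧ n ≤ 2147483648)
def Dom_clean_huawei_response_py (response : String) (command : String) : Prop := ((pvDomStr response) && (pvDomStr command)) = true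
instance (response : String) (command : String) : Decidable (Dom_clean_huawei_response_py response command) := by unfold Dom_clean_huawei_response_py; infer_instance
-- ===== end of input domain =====

-- B replaces A's carried skip-flag loop with strip-all, remove the first echo line, then one stateless filter (objective: simpler).


-- ===== PORT A =====
-- A's for-loop with the skip_first_command flag and the cleaned_lines accumulator,
-- as structural recursion over the lines with the same Bool state.
def pvLoopA (cmd : String) : List String → Bool → List String
  | [], _ => []
  | l :: ls, skip =>
    let line := PySem.Str.strip l
    if skip && (line == cmd) then pvLoopA cmd ls false
    else if PySem.Str.isIn "---- More ----" line then pvLoopA cmd ls skip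
    else if line != "" && !(PySem.Str.endswith line ">" || PySem.Str.endswith line "]" || PySem.Str.endswith line "#")
      then line :: pvLoopA cmd ls skip
      else pvLoopA cmd ls skip

def clean_huawei_response_py (response : String) (command : String) : String :=
  if response == "" then ""
  else
    -- lines = response.split('\n'); sep "\n" ≠ "": split? is always some here
    PySem.Str.join "\n"
      (pvLoopA (PySem.Str.strip command) ((PySem.Str.split? response "\n").getD []) true)

-- ===== PORT B =====
-- Source B's _keep
def pvKeepB (line : String) : Bool :=
  (line != "") && !(PySem.Str.isIn "---- More ----" line)
    && !(PySem.Str.endswith line ">" || PySem.Str.endswith line "]" || PySem.Str.endswith line "#")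

def clean_huawei_response_py_alt (response : String) (command : String) : String :=
  PySem.Str.join "\n"
    ((match PySem.List.remove? (((PySem.Str.split? response "\n").getD []).map PySem.Str.strip)
        (PySem.Str.strip command) with   -- lines.remove(...); ValueError → keep lines unchanged
      | some l => l
      | none => ((PySem.Str.split? response "\n").getD []).map PySem.Str.strip).filter pvKeepB)

-- ===== PRECONDITION & SPEC =====
def Spec_clean_huawei_response_py (response : String) (command : String) (out : String) : Prop := out = clean_huawei_response_py_alt response command
instance (response : String) (command : String) (out : String) : Decidable (Spec_clean_huawei_response_py response command out) := by unfold Spec_clean_huawei_response_py; infer_instance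

-- ===== CLAIM (what is proved, stated in full; the proofs are below) =====
def Claim_equal_clean_huawei_response_py : Prop := ∀ (response : String) (command : String), Dom_clean_huawei_response_py response command → Spec_clean_huawei_response_py response command (clean_huawei_response_py response command)

-- ===== LEMMAS AND PROOFS =====

-- One iteration of A's loop body (echo branch already passed) is a filter step with Source B's _keep.
theorem pvStep (s : String) (t : List String) :
    (if PySem.Str.isIn "---- More ----" s = true then t
     else if (s != "" && !(PySem.Str.endswith s ">" || PySem.Str.endswith s "]" || PySem.Str.endswith s "#")) = true
       then s :: t else t)
    = if pvKeepB s = true then s :: t else t := by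
  by_cases hm : PySem.Str.isIn "---- More ----" s = true <;>
    by_cases hn : (s != "") = true <;>
      by_cases he : (PySem.Str.endswith s ">" || PySem.Str.endswith s "]" || PySem.Str.endswith s "#") = true <;>
        simp_all [pvKeepB]

-- With the flag already consumed, A's loop is exactly the stateless filter.
theorem pvLoopA_false (cmd : String) (ls : List String) :
    pvLoopA cmd ls false = (ls.map PySem.Str.strip).filter pvKeepB := by
  induction ls with
  | nil => rfl
  | cons l ls ih =>
    simp only [pvLoopA, Bool.false_and]
    rw [if_neg (show ¬(false = true) by decide), pvStep, ih]
    simp [List.filter_cons]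

-- With the flag still set, A's loop = remove the first echo line, then filter.
theorem pvLoopA_true (cmd : String) (ls : List String) :
    pvLoopA cmd ls true =
      (match PySem.List.remove? (ls.map PySem.Str.strip) cmd with
        | some l => l
        | none => ls.map PySem.Str.strip).filter pvKeepB := by
  induction ls with
  | nil => rfl
  | cons l ls ih =>
    by_cases he : PySem.Str.strip l = cmd
    · simp only [pvLoopA, he, Bool.true_and, beq_self_eq_true, if_pos, List.map_cons,
        PySem.List.remove?_cons_self, pvLoopA_false]
    · rw [show (l :: ls).map PySem.Str.strip = PySem.Str.strip l :: ls.map PySem.Str.strip from rfl,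
        PySem.List.remove?_cons_of_ne _ he]
      simp only [pvLoopA, Bool.true_and]
      rw [if_neg (show ¬((PySem.Str.strip l == cmd) = true) by simpa using he), pvStep, ih]
      cases hr : PySem.List.remove? (ls.map PySem.Str.strip) cmd with
      | none => simp [List.filter_cons]
      | some t => simp [List.filter_cons]

-- On the empty response B also returns "" (A returns early there).
theorem alt_empty (command : String) : clean_huawei_response_py_alt "" command = "" := by
  have hsplit : ((PySem.Str.split? "" "\n").getD []).map PySem.Str.strip = [""] := by decide
  unfold clean_huawei_response_py_alt
  rw [hsplit]
  by_cases h : PySem.Str.strip command = ""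
  · rw [h, PySem.List.remove?_cons_self]
    decide
  · rw [PySem.List.remove?_cons_of_ne _ (fun hc => h hc.symm)]
    have hnone : PySem.List.remove? ([] : List String) (PySem.Str.strip command) = none := by
      simp [PySem.List.remove?_eq_none_iff]
    rw [hnone]
    decide

-- ===== VERDICT (by name: the statement is the Claim_ definition above) =====
theorem clean_huawei_response_py_spec : Claim_equal_clean_huawei_response_py := by
  intro response command _
  unfold Spec_clean_huawei_response_py clean_huawei_response_py
  by_cases h : response = ""
  · subst h
    simp [alt_empty]
  · rw [if_neg (show ¬((response == "") = true) by simpa using h)]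
    unfold clean_huawei_response_py_alt
    rw [pvLoopA_true]
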